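-- pv_equiv track=rewrite | github.com/bhavyapandya07/Python-0-1 | Lecture 16 Recursion on Non-numerics/Lec16.py | ll
-- ===== SOURCE A (Python) =====
-- def ll(l, e):
--     if len(l) == 1:
--         return e in l[0]
--     else:
--         f = l[0]
--         if e in f:
--             return True
--         else:
--             return ll(l[1:], e)
-- ===== SOURCE B (Python) =====
-- def ll(l, e):
--     return any(e in s for s in l)
-- ===== Notes on version B (the rewrite author's own statement) =====
-- stated objective: faster
-- what changed: Replaces the slicing tail-recursion with a single any() over the list (a fold), removing both the recursion and the O(n^2) list copies from l[1:].
-- outside the precondition, e.g. on ll([], 'x'): A raises IndexError, B returns False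
import Mathlib
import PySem

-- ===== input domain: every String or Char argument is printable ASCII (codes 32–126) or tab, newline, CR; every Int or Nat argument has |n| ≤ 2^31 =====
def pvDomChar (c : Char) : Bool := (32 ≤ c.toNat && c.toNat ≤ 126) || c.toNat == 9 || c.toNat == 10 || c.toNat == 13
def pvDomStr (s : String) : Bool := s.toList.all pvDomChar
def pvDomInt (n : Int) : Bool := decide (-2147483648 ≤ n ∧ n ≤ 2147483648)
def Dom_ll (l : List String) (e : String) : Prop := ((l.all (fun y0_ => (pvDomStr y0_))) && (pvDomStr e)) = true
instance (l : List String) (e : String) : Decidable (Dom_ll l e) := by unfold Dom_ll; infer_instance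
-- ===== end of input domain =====

-- B replaces A's slicing tail-recursion with a single fold (any) over the list; return value only.


-- ===== PORT A =====
def ll (l : List String) (e : String) : Bool :=
  match l with
  | [] => false                     -- Python evaluates l[0] here and raises IndexError; excluded by Pre_ll
  | [f] => PySem.Str.isIn e f       -- len(l) == 1: return e in l[0]
  | f :: rest =>                    -- f = l[0]; if e in f: True else ll(l[1:], e)
      if PySem.Str.isIn e f then true else ll rest e

-- ===== PORT B =====
def ll_alt (l : List String) (e : String) : Bool :=
  l.any (fun s => PySem.Str.isIn e s)

-- ===== PRECONDITION & SPEC =====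
-- Pre_ excludes only the empty list, on which A raises IndexError (l[0]).
def Pre_ll (l : List String) (e : String) : Prop := l ≠ []
instance (l : List String) (e : String) : Decidable (Pre_ll l e) := by unfold Pre_ll; infer_instance
def pvWitness_ll : List String × String := (["ab", "cd"], "c")

def Spec_ll (l : List String) (e : String) (out : Bool) : Prop := out = ll_alt l e
instance (l : List String) (e : String) (out : Bool) : Decidable (Spec_ll l e out) := by unfold Spec_ll; infer_instance

-- ===== CLAIM (what is proved, stated in full; the proofs are below) =====
def Claim_equal_ll : Prop := ∀ (l : List String) (e : String), Dom_ll l e → Pre_ll l e → Spec_ll l e (ll l e)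

-- ===== LEMMAS AND PROOFS =====
theorem ll_eq_alt (l : List String) (e : String) (h : l ≠ []) : ll l e = ll_alt l e := by
  induction l with
  | nil => exact absurd rfl h
  | cons f rest ih =>
    cases rest with
    | nil => simp [ll, ll_alt]
    | cons g t =>
      simp only [ll, ll_alt, List.any_cons, PySem.Str.isIn] at *
      by_cases hf : PySem.Chars.isIn e.toList f.toList = true
      · simp [hf]
      · simp [hf, ih (by simp)]

-- ===== VERDICT (by name: the statement is the Claim_ definition above) =====
theorem ll_spec : Claim_equal_ll := by
  intro l e _ hp
  exact ll_eq_alt l e hp
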